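-- pv_equiv track=rewrite | github.com/lnhutnam/coding-bat-solutions | string_2/count_code.py | count_code
-- ===== SOURCE A (Python) =====
-- def count_code(str):
--     count = 0
--     i = 0
--     while i < len(str) - 3:
--         if str[i: i + 4][0] == 'c' and str[i: i + 4][1] == 'o' and str[i: i + 4][3] == 'e':
--             count += 1
--             i += 4
--         else:
--             i += 1
--     return count
-- ===== SOURCE B (Python) =====
-- def count_code(str):
--     # Count every window matching c, o, ?, e; matches can never overlap,
--     # so counting all windows equals the original skip-by-4 scan.
--     return sum(a == 'c' and b == 'o' and d == 'e'
--                for a, b, _, d in zip(str, str[1:], str[2:], str[3:]))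
-- ===== Notes on version B (the rewrite author's own statement) =====
-- stated objective: idiomatic
-- what changed: Replaces the stateful skip-by-4 while loop (which builds a 4-char slice and indexes it three times per step) with a single comprehension over 4-wide zip windows counting every matching window, relying on the fact that co?e matches can never overlap.
import Mathlib
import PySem

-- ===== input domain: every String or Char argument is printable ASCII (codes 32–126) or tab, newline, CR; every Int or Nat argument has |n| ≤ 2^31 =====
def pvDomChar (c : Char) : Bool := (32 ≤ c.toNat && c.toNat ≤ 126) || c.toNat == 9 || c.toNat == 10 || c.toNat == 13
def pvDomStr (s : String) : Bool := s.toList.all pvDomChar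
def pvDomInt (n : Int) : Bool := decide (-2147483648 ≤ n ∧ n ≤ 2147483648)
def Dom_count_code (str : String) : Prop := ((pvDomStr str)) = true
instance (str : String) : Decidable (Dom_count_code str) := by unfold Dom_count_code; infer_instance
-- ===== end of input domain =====

-- B replaces A's stateful skip-by-4 index walk with a count over all 4-wide zip
-- windows (matches can never overlap); objective: idiomatic.

-- ===== PORT A =====
-- A's while loop with index i is transcribed as recursion on the remaining
-- suffix str[i:]: the guard 'i < len(str) - 3' is 'at least 4 chars remain',
-- str[i:i+4][0]/[1]/[3] are the 1st/2nd/4th of the next four chars, and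
-- 'i += 4' / 'i += 1' drop 4 resp. 1 chars. Exact on every input.
def count_code_loop : List Char → Int
  | a :: b :: c :: d :: t =>
      if a = 'c' ∧ b = 'o' ∧ d = 'e' then 1 + count_code_loop t
      else count_code_loop (b :: c :: d :: t)
  | _ => 0

def count_code (str : String) : Int := count_code_loop str.toList

-- ===== PORT B =====
-- transliteration of Source B: sum over zip(s, s[1:], s[2:], s[3:]) of the 0/1 test
def count_code_alt (str : String) : Int :=
  let cs := str.toList
  ((((cs.zip (cs.drop 1)).zip (cs.drop 2)).zip (cs.drop 3)).foldl
    (fun acc p => acc + (if p.1.1.1 = 'c' ∧ p.1.1.2 = 'o' ∧ p.2 = 'e' then 1 else 0)) 0)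

-- ===== PRECONDITION & SPEC =====
def Spec_count_code (str : String) (out : Int) : Prop := out = count_code_alt str
instance (str : String) (out : Int) : Decidable (Spec_count_code str out) := by unfold Spec_count_code; infer_instance

-- ===== CLAIM (what is proved, stated in full; the proofs are below) =====
def Claim_equal_count_code : Prop := ∀ (str : String), Dom_count_code str → Spec_count_code str (count_code str)

-- ===== LEMMAS AND PROOFS =====


-- sliding reformulation of B: count every window, advancing one char at a time
def slideB : List Char → Int
  | a :: b :: c :: d :: t =>
      (if a = 'c' ∧ b = 'o' ∧ d = 'e' then 1 else 0) + slideB (b :: c :: d :: t)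
  | _ => 0

-- B's zip-fold computes slideB
theorem altB_eq_slideB (cs : List Char) (acc : Int) :
    ((((cs.zip (cs.drop 1)).zip (cs.drop 2)).zip (cs.drop 3)).foldl
      (fun acc p => acc + (if p.1.1.1 = 'c' ∧ p.1.1.2 = 'o' ∧ p.2 = 'e' then 1 else 0)) acc)
      = acc + slideB cs := by
  induction cs generalizing acc with
  | nil => simp [slideB]
  | cons a t ih =>
    match t with
    | [] => simp [slideB]
    | [b] => simp [slideB]
    | [b, c] => simp [slideB]
    | b :: c :: d :: t' =>
      simp only [List.drop, List.zip_cons_cons, List.foldl_cons] at ih ⊢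
      rw [ih]
      show _ = acc + slideB (a :: b :: c :: d :: t')
      rw [slideB]
      ring

-- a window whose first char is not 'c' never matches
theorem slideB_cons_of_ne_c (x : Char) (rest : List Char) (hx : x ≠ 'c') :
    slideB (x :: rest) = slideB rest := by
  match rest with
  | [] => simp [slideB]
  | [b] => simp [slideB]
  | [b, c] => simp [slideB]
  | b :: c :: d :: t' => rw [slideB]; simp [hx]

-- a window whose second char is not 'o' never matches
theorem slideB_cons_cons_of_ne_o (x y : Char) (rest : List Char) (hy : y ≠ 'o') :
    slideB (x :: y :: rest) = slideB (y :: rest) := by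
  match rest with
  | [] => simp [slideB]
  | [c] => simp [slideB]
  | c :: d :: t' => rw [slideB]; simp [hy]

-- the key fact: A's skip-by-4 scan equals the count of all matching windows
theorem loopA_eq_slideB (cs : List Char) : count_code_loop cs = slideB cs := by
  induction cs using count_code_loop.induct with
  | case1 a b c d t h ih =>
    obtain ⟨ha, hb, hd⟩ := h
    rw [count_code_loop, slideB, if_pos ⟨ha, hb, hd⟩, if_pos ⟨ha, hb, hd⟩]
    rw [slideB_cons_of_ne_c b (c :: d :: t) (by rw [hb]; decide),
        slideB_cons_cons_of_ne_o c d t (by rw [hd]; decide),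
        slideB_cons_of_ne_c d t (by rw [hd]; decide), ih]
  | case2 a b c d t h ih =>
    rw [count_code_loop, slideB, if_neg h, if_neg h, ih]
    simp
  | case3 x h => cases x with
    | nil => rfl
    | cons a t => match t with
      | [] => rfl
      | [b] => rfl
      | [b, c] => rfl
      | b :: c :: d :: t' => exact absurd rfl (h a b c d t')

-- ===== VERDICT (by name: the statement is the Claim_ definition above) =====
theorem count_code_spec : Claim_equal_count_code := by
  intro str _
  unfold Spec_count_code count_code count_code_alt
  rw [loopA_eq_slideB, altB_eq_slideB]
  simp
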